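-- pv_equiv track=rewrite | github.com/sarahsatchell/cs.067_capstone | backend/simulation/test_backend_simulation.py | get_local_grid_view
-- ===== SOURCE A (Python) =====
-- from typing import List, Tuple, Set, Dict
--
-- def get_local_grid_view(maze: List[List[int]], position: Tuple[int, int], radius: int = 2) -> List[List[int]]:
--     """
--     Extract a local grid view centered on the agent's position.
--
--     Args:
--         maze: Full maze grid
--         position: (x, y) agent position
--         radius: How many cells in each direction to include
--
--     Returns:
--         2D array representing the local view
--     """
--     if not position:
--         return [[]]
--
--     x, y = position
--     rows = len(maze)
--     cols = len(maze[0]) if rows > 0 else 0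
--
--     # Extract view
--     view = []
--     for i in range(x - radius, x + radius + 1):
--         row = []
--         for j in range(y - radius, y + radius + 1):
--             if 0 <= i < rows and 0 <= j < cols:
--                 row.append(maze[i][j])
--             else:
--                 row.append(1)  # Treat out-of-bounds as walls
--         view.append(row)
--
--     return view
-- ===== SOURCE B (Python) =====
-- from typing import List, Tuple
--
-- def get_local_grid_view(maze: List[List[int]], position: Tuple[int, int], radius: int = 2) -> List[List[int]]:
--     """Local view around position: preallocate an all-walls window, then copy
--     only the clamped in-bounds sub-rectangle of the maze into it."""
--     if not position:
--         return [[]]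
--
--     x, y = position
--     rows = len(maze)
--     cols = len(maze[0]) if rows > 0 else 0
--
--     size = 2 * radius + 1
--     view = [[1] * size for _ in range(size)]
--     for i in range(max(x - radius, 0), min(x + radius, rows - 1) + 1):
--         for j in range(max(y - radius, 0), min(y + radius, cols - 1) + 1):
--             view[i - (x - radius)][j - (y - radius)] = maze[i][j]
--     return view
-- ===== Notes on version B (the rewrite author's own statement) =====
-- stated objective: simpler
-- what changed: Instead of scanning the full (2r+1)^2 window with a per-cell bounds test and append, B preallocates an all-walls window and copies only the clamped in-bounds sub-rectangle of the maze into it.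
import Mathlib
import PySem

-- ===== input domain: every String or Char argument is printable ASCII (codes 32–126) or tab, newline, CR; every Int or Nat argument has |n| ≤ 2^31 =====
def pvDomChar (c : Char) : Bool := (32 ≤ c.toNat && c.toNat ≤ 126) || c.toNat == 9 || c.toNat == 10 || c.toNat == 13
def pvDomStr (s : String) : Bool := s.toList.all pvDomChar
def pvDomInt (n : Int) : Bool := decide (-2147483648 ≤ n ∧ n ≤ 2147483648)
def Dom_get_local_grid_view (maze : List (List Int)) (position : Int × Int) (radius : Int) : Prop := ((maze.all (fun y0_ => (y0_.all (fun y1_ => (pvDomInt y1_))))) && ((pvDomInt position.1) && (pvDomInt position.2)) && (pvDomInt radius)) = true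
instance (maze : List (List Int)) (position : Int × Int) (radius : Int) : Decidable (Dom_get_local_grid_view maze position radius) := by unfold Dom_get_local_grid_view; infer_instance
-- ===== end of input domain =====

-- B replaces A's full-window scan with per-cell bounds test by an all-walls preallocated
-- window into which only the clamped in-bounds sub-rectangle of the maze is copied (objective: simpler).


-- ===== PORT A =====
-- 'if not position: return [[]]' never fires here: position is a 2-tuple, always truthy in Python.
def get_local_grid_view (maze : List (List Int)) (position : Int × Int) (radius : Int) : List (List Int) :=
  let x := position.1
  let y := position.2
  let rows : Int := (maze.length : Int)
  let cols : Int := if rows > 0 then ((PySem.List.pyGetD maze 0 []).length : Int) else 0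
  (PySem.List.pyRange (x - radius) (x + radius + 1) 1).foldl (fun view i =>
    view ++ [(PySem.List.pyRange (y - radius) (y + radius + 1) 1).foldl (fun row j =>
      row ++ [if 0 ≤ i ∧ i < rows ∧ 0 ≤ j ∧ j < cols then
                PySem.List.pyGetD (PySem.List.pyGetD maze i []) j 1
              else 1]) []]) []

-- ===== PORT B =====
-- 'if not position: return [[]]' never fires here: position is a 2-tuple, always truthy in Python.
def get_local_grid_view_alt (maze : List (List Int)) (position : Int × Int) (radius : Int) : List (List Int) :=
  let x := position.1
  let y := position.2
  let rows : Int := (maze.length : Int)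
  let cols : Int := if rows > 0 then ((PySem.List.pyGetD maze 0 []).length : Int) else 0
  let size : Int := 2 * radius + 1
  let init : List (List Int) := List.replicate size.toNat (List.replicate size.toNat 1)
  (PySem.List.pyRange (max (x - radius) 0) (min (x + radius) (rows - 1) + 1) 1).foldl (fun view i =>
    (PySem.List.pyRange (max (y - radius) 0) (min (y + radius) (cols - 1) + 1) 1).foldl (fun v j =>
      PySem.List.pySetD v (i - (x - radius))
        (PySem.List.pySetD (PySem.List.pyGetD v (i - (x - radius)) []) (j - (y - radius))
          (PySem.List.pyGetD (PySem.List.pyGetD maze i []) j 1))) view) init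

-- ===== PRECONDITION & SPEC =====
-- Pre_ excludes exactly the inputs on which Python A raises IndexError: a ragged maze whose
-- row i, visited by the window, is shorter than the clamped column range demands.
def Pre_get_local_grid_view (maze : List (List Int)) (position : Int × Int) (radius : Int) : Prop :=
  ∀ i : Nat, i < maze.length →
    position.1 - radius ≤ (i : Int) → (i : Int) ≤ position.1 + radius →
    max (position.2 - radius) 0 ≤ min (position.2 + radius) (((maze.getD 0 []).length : Int) - 1) →
    min (position.2 + radius) (((maze.getD 0 []).length : Int) - 1) < ((maze.getD i []).length : Int)
instance (maze : List (List Int)) (position : Int × Int) (radius : Int) : Decidable (Pre_get_local_grid_view maze position radius) := by unfold Pre_get_local_grid_view; infer_instance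

def pvWitness_get_local_grid_view : List (List Int) × (Int × Int) × Int := ([[0, 1], [1, 0]], (0, 0), 1)

def Spec_get_local_grid_view (maze : List (List Int)) (position : Int × Int) (radius : Int) (out : List (List Int)) : Prop := out = get_local_grid_view_alt maze position radius
instance (maze : List (List Int)) (position : Int × Int) (radius : Int) (out : List (List Int)) : Decidable (Spec_get_local_grid_view maze position radius out) := by unfold Spec_get_local_grid_view; infer_instance

-- ===== CLAIM (what is proved, stated in full; the proofs are below) =====
def Claim_equal_get_local_grid_view : Prop := ∀ (maze : List (List Int)) (position : Int × Int) (radius : Int), Dom_get_local_grid_view maze position radius → Pre_get_local_grid_view maze position radius → Spec_get_local_grid_view maze position radius (get_local_grid_view maze position radius)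

-- ===== LEMMAS AND PROOFS =====

lemma pv_localize (a : Int) (ha : 0 ≤ a) (yoff : Int) (w : Int → Int) :
    ∀ (rng : List Int) (G : List (List Int)),
      rng.foldl (fun v j => PySem.List.pySetD v a
          (PySem.List.pySetD (PySem.List.pyGetD v a []) (j - yoff) (w j))) G
        = PySem.List.pySetD G a
            (rng.foldl (fun r j => PySem.List.pySetD r (j - yoff) (w j)) (PySem.List.pyGetD G a [])) := by
  have hset : ∀ (v : List (List Int)) (r : List Int), PySem.List.pySetD v a r = v.set a.toNat r :=
    fun v r => PySem.List.pySetD_of_nonneg v r ha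
  have hget : ∀ (v : List (List Int)), PySem.List.pyGetD v a [] = v.getD a.toNat [] :=
    fun v => PySem.List.pyGetD_of_nonneg v [] ha
  intro rng
  induction rng with
  | nil =>
    intro G
    simp only [List.foldl_nil, hset, hget]
    by_cases h : a.toNat < G.length
    · rw [show G.getD a.toNat [] = G[a.toNat] from List.getD_eq_getElem _ _ h, List.set_getElem_self]
    · exact (List.set_eq_of_length_le (Nat.le_of_not_lt h)).symm
  | cons j rest ih =>
    intro G
    simp only [List.foldl_cons]
    rw [ih]
    simp only [hset, hget]
    by_cases h : a.toNat < G.length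
    · have h1 : (G.set a.toNat (PySem.List.pySetD (G.getD a.toNat []) (j - yoff) (w j))).getD a.toNat []
          = PySem.List.pySetD (G.getD a.toNat []) (j - yoff) (w j) := by
        rw [List.getD_eq_getElem?_getD, List.getElem?_set_self h]; rfl
      rw [h1, List.set_set]
    · have hle := Nat.le_of_not_lt h
      rw [List.set_eq_of_length_le hle, List.set_eq_of_length_le hle, List.set_eq_of_length_le hle]

lemma pv_rowfold (val : Int → Int) (off d : Int) :
    ∀ (c : Int) (L : List Int) (b : Nat), off ≤ c →
      ((PySem.List.pyRange c d 1).foldl (fun v j => PySem.List.pySetD v (j - off) (val j)) L)[b]?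
        = if c ≤ off + (b : Int) ∧ off + (b : Int) < d ∧ b < L.length
          then some (val (off + (b : Int))) else L[b]? := by
  suffices H : ∀ (n : Nat) (c : Int) (L : List Int) (b : Nat), (d - c).toNat ≤ n → off ≤ c →
      ((PySem.List.pyRange c d 1).foldl (fun v j => PySem.List.pySetD v (j - off) (val j)) L)[b]?
        = if c ≤ off + (b : Int) ∧ off + (b : Int) < d ∧ b < L.length
          then some (val (off + (b : Int))) else L[b]? from
    fun c L b hc => H (d - c).toNat c L b le_rfl hc
  intro n
  induction n with
  | zero =>
    intro c L b hn hc
    rw [PySem.List.pyRange_one_eq_nil (by omega), List.foldl_nil, if_neg (by omega)]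
  | succ n ih =>
    intro c L b hn hc
    by_cases hcd : d ≤ c
    · rw [PySem.List.pyRange_one_eq_nil hcd, List.foldl_nil, if_neg (by omega)]
    · rw [PySem.List.pyRange_one_cons (by omega)]
      simp only [List.foldl_cons]
      rw [ih (c + 1) _ b (by omega) (by omega)]
      rw [PySem.List.length_pySetD, PySem.List.pySetD_of_nonneg _ _ (by omega : (0:Int) ≤ c - off),
          List.getElem?_set]
      split_ifs <;> try rfl
      all_goals try (exfalso; omega)
      · rw [show off + (b : Int) = c by omega]
      · rw [List.getElem?_eq_none (by omega)]

lemma pv_gridfold (val : Int → Int → Int) (xoff yoff c2 d2 d : Int) :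
    ∀ (c : Int) (G : List (List Int)) (b : Nat), xoff ≤ c →
      ((PySem.List.pyRange c d 1).foldl (fun view i =>
          (PySem.List.pyRange c2 d2 1).foldl (fun v j =>
            PySem.List.pySetD v (i - xoff)
              (PySem.List.pySetD (PySem.List.pyGetD v (i - xoff) []) (j - yoff) (val i j))) view) G)[b]?
        = if c ≤ xoff + (b : Int) ∧ xoff + (b : Int) < d ∧ b < G.length
          then some ((PySem.List.pyRange c2 d2 1).foldl
                      (fun r j => PySem.List.pySetD r (j - yoff) (val (xoff + (b : Int)) j)) (G.getD b []))
          else G[b]? := by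
  suffices H : ∀ (n : Nat) (c : Int) (G : List (List Int)) (b : Nat), (d - c).toNat ≤ n → xoff ≤ c →
      ((PySem.List.pyRange c d 1).foldl (fun view i =>
          (PySem.List.pyRange c2 d2 1).foldl (fun v j =>
            PySem.List.pySetD v (i - xoff)
              (PySem.List.pySetD (PySem.List.pyGetD v (i - xoff) []) (j - yoff) (val i j))) view) G)[b]?
        = if c ≤ xoff + (b : Int) ∧ xoff + (b : Int) < d ∧ b < G.length
          then some ((PySem.List.pyRange c2 d2 1).foldl
                      (fun r j => PySem.List.pySetD r (j - yoff) (val (xoff + (b : Int)) j)) (G.getD b []))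
          else G[b]? from
    fun c G b hc => H (d - c).toNat c G b le_rfl hc
  intro n
  induction n with
  | zero =>
    intro c G b hn hc
    rw [show PySem.List.pyRange c d 1 = [] from PySem.List.pyRange_one_eq_nil (by omega), List.foldl_nil, if_neg (by omega)]
  | succ n ih =>
    intro c G b hn hc
    by_cases hcd : d ≤ c
    · rw [show PySem.List.pyRange c d 1 = [] from PySem.List.pyRange_one_eq_nil hcd, List.foldl_nil, if_neg (by omega)]
    · rw [show PySem.List.pyRange c d 1 = c :: PySem.List.pyRange (c+1) d 1 from PySem.List.pyRange_one_cons (by omega)]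
      simp only [List.foldl_cons]
      rw [pv_localize (c - xoff) (by omega) yoff (val c)]
      rw [ih (c + 1) _ b (by omega) (by omega)]
      rw [PySem.List.length_pySetD, PySem.List.pySetD_of_nonneg _ _ (by omega : (0:Int) ≤ c - xoff),
          List.getElem?_set]
      split_ifs <;> try rfl
      all_goals try (exfalso; omega)
      · rw [List.getD_eq_getElem?_getD, List.getElem?_set, if_neg (by omega),
            ← List.getD_eq_getElem?_getD]
      · rw [show xoff + (b : Int) = c by omega,
            PySem.List.pyGetD_of_nonneg _ _ (by omega : (0:Int) ≤ c - xoff),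
            show (c - xoff).toNat = b by omega]
      · rw [List.getElem?_eq_none (by omega)]

-- ===== VERDICT (by name: the statement is the Claim_ definition above) =====
theorem get_local_grid_view_spec : Claim_equal_get_local_grid_view := by
  intro maze position radius _ _
  unfold Spec_get_local_grid_view
  unfold get_local_grid_view get_local_grid_view_alt
  simp only [PySem.List.foldl_append_singleton_eq_map, List.nil_append]
  apply List.ext_getElem?
  intro b
  rw [List.getElem?_map, PySem.List.getElem?_pyRange_one]
  rw [pv_gridfold _ _ _ _ _ _ _ _ _ (le_max_left _ _)]
  set C : Int := (if (maze.length : Int) > 0 then ((PySem.List.pyGetD maze 0 []).length : Int) else 0) with hC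
  rw [show (position.1 + radius + 1 - (position.1 - radius)).toNat = (2 * radius + 1).toNat by omega,
      List.length_replicate]
  by_cases hb : b < (2 * radius + 1).toNat
  · rw [if_pos hb]
    by_cases hi : 0 ≤ position.1 - radius + (b : Int) ∧ position.1 - radius + (b : Int) < (maze.length : Int)
    · rw [if_pos (by omega)]
      rw [show (List.replicate (2 * radius + 1).toNat (List.replicate (2 * radius + 1).toNat (1:Int))).getD b []
            = List.replicate (2 * radius + 1).toNat (1:Int) by
          rw [List.getD_eq_getElem?_getD, List.getElem?_replicate, if_pos hb]; rfl]
      simp only [Option.map_some]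
      congr 1
      apply List.ext_getElem?
      intro b2
      rw [List.getElem?_map, PySem.List.getElem?_pyRange_one]
      rw [pv_rowfold _ _ _ _ _ _ (le_max_left _ _), List.length_replicate]
      rw [show (position.2 + radius + 1 - (position.2 - radius)).toNat = (2 * radius + 1).toNat by omega]
      by_cases hb2 : b2 < (2 * radius + 1).toNat
      · rw [if_pos hb2]
        simp only [Option.map_some]
        by_cases hj : 0 ≤ position.2 - radius + (b2 : Int) ∧ position.2 - radius + (b2 : Int) < C
        · rw [if_pos (by omega), if_pos (by omega)]
        · rw [if_neg (by omega), if_neg (by omega), List.getElem?_replicate, if_pos hb2]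
      · rw [if_neg hb2]
        simp only [Option.map_none]
        rw [if_neg (by omega), List.getElem?_replicate, if_neg hb2]
    · rw [if_neg (by omega), List.getElem?_replicate, if_pos hb]
      simp only [Option.map_some]
      congr 1
      apply List.ext_getElem?
      intro b2
      rw [List.getElem?_map, PySem.List.getElem?_pyRange_one, List.getElem?_replicate]
      rw [show (position.2 + radius + 1 - (position.2 - radius)).toNat = (2 * radius + 1).toNat by omega]
      by_cases hb2 : b2 < (2 * radius + 1).toNat
      · rw [if_pos hb2, if_pos hb2]
        simp only [Option.map_some]
        rw [if_neg (by omega)]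
      · rw [if_neg hb2, if_neg hb2]
        rfl
  · rw [if_neg hb, if_neg (by omega), List.getElem?_replicate, if_neg hb]
    rfl
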